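-- pv_equiv track=rewrite | github.com/MeProductModelling/Murrelektronik_PythonFMU_Test_Repo | Modules/DO8.py | digital_outputs
-- ===== SOURCE A (Python) =====
-- def digital_outputs(
--     byte1, byte2, pinBased, portBased, compact
-- ):  # This function is tested
--     """
--     This method returns actuator values by the Simulations models based on Input bytes from PLC, pin mapping parameters.
--
--     :param byte1: Input byte 1 from PLC to control Actuators by the Simulation Module
--     :param byte2: Input byte 2 from PLC to control Actuators by the Simulation Module
--     :param pinBased:  Parameter of the Simulation Module basically describes the pin mapping.
--     :param portBased: Parameter of the Simulation Module basically describes the port mapping.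
--     :param compact: Parameter of the Simulation Module basically describes the complex mapping.
--     :return: This method returns Actuator values as an array of bits 0s and 1s.
--     """
--     # final bits
--     bits = [0, 0, 0, 0, 0, 0, 0, 0]
--
--     # The following section is to convert byte to bits....triggering the actuator values.
--     if 0 <= byte1 and byte2 <= 255:
--
--         if (
--             pinBased == True and portBased == False and compact == False
--         ):  # This loop is tested
--             bits1 = [(byte1 >> i) & 1 for i in range(7, -1, -1)]
--             bits2 = [(byte2 >> i) & 1 for i in range(7, -1, -1)]
--             # Arrange bits according to manual
--             bits[0], bits[1], bits[2], bits[3], bits[4], bits[5], bits[6], bits[7] = (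
--                 bits2[0],
--                 bits1[0],
--                 bits2[1],
--                 bits1[1],
--                 bits2[2],
--                 bits1[2],
--                 bits2[3],
--                 bits1[3],
--             )
--
--         elif (
--             pinBased == False and portBased == True and compact == False
--         ):  # This loop is tested
--             bits = [(byte1 >> i) & 1 for i in range(7, -1, -1)]
--             # Arrange bits according to manual
--             bits[0], bits[1], bits[2], bits[3], bits[4], bits[5], bits[6], bits[7] = (
--                 bits[1],
--                 bits[0],
--                 bits[3],
--                 bits[2],
--                 bits[5],
--                 bits[4],
--                 bits[7],
--                 bits[6],
--             )
--
--         elif (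
--             pinBased == False and portBased == False and compact == True
--         ):  # This loop is tested
--             bits = [(byte1 >> i) & 1 for i in range(7, -1, -1)]
--             # Arrange bits according to manual
--             bits[0], bits[1], bits[2], bits[3], bits[4], bits[5], bits[6], bits[7] = (
--                 bits[1],
--                 bits[0],
--                 bits[3],
--                 bits[2],
--                 bits[5],
--                 bits[4],
--                 bits[7],
--                 bits[6],
--             )
--
--         else:
--             raise ValueError(
--                 "Two or more output mapping are selected or noone is selected"
--             )
--
--     else:
--         raise ValueError("Input must be a single byte (0-255).")
--
--     return bits
-- ===== SOURCE B (Python) =====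
-- def digital_outputs(byte1, byte2, pinBased, portBased, compact):
--     if not (0 <= byte1 and byte2 <= 255):
--         raise ValueError("Input must be a single byte (0-255).")
--     if pinBased == True and portBased == False and compact == False:
--         # interleave the high-nibble bit streams of byte2 and byte1, MSB first
--         return [b for i in range(7, 3, -1) for b in ((byte2 >> i) & 1, (byte1 >> i) & 1)]
--     if pinBased == False and (portBased != compact):
--         # walk the four 2-bit crumbs of byte1 MSB-first, emitting each pair swapped
--         out = []
--         for i in range(6, -2, -2):
--             crumb = (byte1 >> i) & 3
--             out.append(crumb & 1)
--             out.append(crumb >> 1)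
--         return out
--     raise ValueError("Two or more output mapping are selected or noone is selected")
-- ===== Notes on version B (the rewrite author's own statement) =====
-- stated objective: simpler
-- what changed: The portBased/compact branches walk byte1's four 2-bit crumbs MSB-first and emit each pair swapped directly, and the pinBased branch interleaves the two high-nibble bit streams in one comprehension, instead of extracting all eight bits and then permuting them by an eight-slot tuple assignment.
import Mathlib
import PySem

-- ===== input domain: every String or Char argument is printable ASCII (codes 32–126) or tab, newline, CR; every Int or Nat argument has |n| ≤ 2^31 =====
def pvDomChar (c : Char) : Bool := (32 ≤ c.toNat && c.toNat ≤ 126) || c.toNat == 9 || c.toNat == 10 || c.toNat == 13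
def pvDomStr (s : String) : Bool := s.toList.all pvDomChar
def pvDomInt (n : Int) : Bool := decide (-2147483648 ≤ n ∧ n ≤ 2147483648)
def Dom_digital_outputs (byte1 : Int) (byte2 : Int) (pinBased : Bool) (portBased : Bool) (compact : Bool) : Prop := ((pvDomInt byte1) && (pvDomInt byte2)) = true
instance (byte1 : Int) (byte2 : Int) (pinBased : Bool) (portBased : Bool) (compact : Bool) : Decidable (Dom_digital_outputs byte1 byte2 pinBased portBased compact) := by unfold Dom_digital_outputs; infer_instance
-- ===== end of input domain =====

-- B replaces A's extract-all-eight-bits-then-permute with direct emission: the portBased/compact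
-- branches walk byte1's four 2-bit crumbs MSB-first emitting each pair swapped, and the pinBased
-- branch interleaves the two high-nibble bit streams in one pass (objective: simpler).


-- `(n >> i) & m` (m a positive all-ones mask, i ≥ 0) is ported exactly as
-- `(n.fdiv 2^i).fmod (m+1)`: Int.fdiv is Python's floor shift, Int.fmod has the divisor's sign.

-- ===== PORT A =====
def digital_outputs (byte1 : Int) (byte2 : Int) (pinBased : Bool) (portBased : Bool) (compact : Bool) : List Int :=
  -- bits = [0,0,0,0,0,0,0,0] is fully overwritten in every returning branch
  if 0 ≤ byte1 ∧ byte2 ≤ 255 then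
    if pinBased == true && portBased == false && compact == false then
      let bits1 := (PySem.List.pyRange 7 (-1) (-1)).map (fun i => (byte1.fdiv (2 ^ i.toNat)).fmod 2)
      let bits2 := (PySem.List.pyRange 7 (-1) (-1)).map (fun i => (byte2.fdiv (2 ^ i.toNat)).fmod 2)
      [bits2.getD 0 0, bits1.getD 0 0, bits2.getD 1 0, bits1.getD 1 0,
       bits2.getD 2 0, bits1.getD 2 0, bits2.getD 3 0, bits1.getD 3 0]
    else if pinBased == false && portBased == true && compact == false then
      let bits := (PySem.List.pyRange 7 (-1) (-1)).map (fun i => (byte1.fdiv (2 ^ i.toNat)).fmod 2)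
      [bits.getD 1 0, bits.getD 0 0, bits.getD 3 0, bits.getD 2 0,
       bits.getD 5 0, bits.getD 4 0, bits.getD 7 0, bits.getD 6 0]
    else if pinBased == false && portBased == false && compact == true then
      let bits := (PySem.List.pyRange 7 (-1) (-1)).map (fun i => (byte1.fdiv (2 ^ i.toNat)).fmod 2)
      [bits.getD 1 0, bits.getD 0 0, bits.getD 3 0, bits.getD 2 0,
       bits.getD 5 0, bits.getD 4 0, bits.getD 7 0, bits.getD 6 0]
    else []  -- raise ValueError("Two or more output mapping are selected or noone is selected")
  else []    -- raise ValueError("Input must be a single byte (0-255).")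

-- ===== PORT B =====
def digital_outputs_alt (byte1 : Int) (byte2 : Int) (pinBased : Bool) (portBased : Bool) (compact : Bool) : List Int :=
  if ¬ (0 ≤ byte1 ∧ byte2 ≤ 255) then []  -- raise ValueError("Input must be a single byte (0-255).")
  else if pinBased == true && portBased == false && compact == false then
    (PySem.List.pyRange 7 3 (-1)).flatMap
      (fun i => [(byte2.fdiv (2 ^ i.toNat)).fmod 2, (byte1.fdiv (2 ^ i.toNat)).fmod 2])
  else if pinBased == false && (portBased != compact) then
    (PySem.List.pyRange 6 (-2) (-2)).foldl
      (fun out i =>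
        let crumb := (byte1.fdiv (2 ^ i.toNat)).fmod 4
        out ++ [crumb.fmod 2, crumb.fdiv 2]) []
  else []  -- raise ValueError("Two or more output mapping are selected or noone is selected")

-- ===== PRECONDITION & SPEC =====
-- Pre_ excludes exactly the inputs where A raises ValueError: guard 0 <= byte1 and byte2 <= 255
-- fails, or not exactly one of the three mapping flags is set.
def Pre_digital_outputs (byte1 : Int) (byte2 : Int) (pinBased : Bool) (portBased : Bool) (compact : Bool) : Prop :=
  (0 ≤ byte1 ∧ byte2 ≤ 255) ∧
    ((pinBased = true ∧ portBased = false ∧ compact = false) ∨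
     (pinBased = false ∧ portBased = true ∧ compact = false) ∨
     (pinBased = false ∧ portBased = false ∧ compact = true))
instance (byte1 : Int) (byte2 : Int) (pinBased : Bool) (portBased : Bool) (compact : Bool) : Decidable (Pre_digital_outputs byte1 byte2 pinBased portBased compact) := by unfold Pre_digital_outputs; infer_instance

def pvWitness_digital_outputs : Int × Int × Bool × Bool × Bool := (5, 9, true, false, false)

def Spec_digital_outputs (byte1 : Int) (byte2 : Int) (pinBased : Bool) (portBased : Bool) (compact : Bool) (out : List Int) : Prop := out = digital_outputs_alt byte1 byte2 pinBased portBased compact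
instance (byte1 : Int) (byte2 : Int) (pinBased : Bool) (portBased : Bool) (compact : Bool) (out : List Int) : Decidable (Spec_digital_outputs byte1 byte2 pinBased portBased compact out) := by unfold Spec_digital_outputs; infer_instance

-- ===== CLAIM (what is proved, stated in full; the proofs are below) =====
def Claim_equal_digital_outputs : Prop := ∀ (byte1 : Int) (byte2 : Int) (pinBased : Bool) (portBased : Bool) (compact : Bool), Dom_digital_outputs byte1 byte2 pinBased portBased compact → Pre_digital_outputs byte1 byte2 pinBased portBased compact → Spec_digital_outputs byte1 byte2 pinBased portBased compact (digital_outputs byte1 byte2 pinBased portBased compact)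

-- ===== LEMMAS AND PROOFS =====
theorem pvRange7 : PySem.List.pyRange 7 (-1) (-1) = [7, 6, 5, 4, 3, 2, 1, 0] := by decide
theorem pvRange73 : PySem.List.pyRange 7 3 (-1) = [7, 6, 5, 4] := by decide
theorem pvRange6 : PySem.List.pyRange 6 (-2) (-2) = [6, 4, 2, 0] := by decide

-- ===== VERDICT (by name: the statement is the Claim_ definition above) =====
theorem digital_outputs_spec : Claim_equal_digital_outputs := by
  intro byte1 byte2 pinBased portBased compact _ hpre
  obtain ⟨hg, hf⟩ := hpre
  unfold Spec_digital_outputs digital_outputs digital_outputs_alt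
  rcases hf with ⟨h1, h2, h3⟩ | ⟨h1, h2, h3⟩ | ⟨h1, h2, h3⟩ <;> subst h1 <;> subst h2 <;> subst h3 <;>
    simp [hg, pvRange7, pvRange73, pvRange6, List.getD, List.flatMap, Int.fmod_eq_emod,
      Int.fdiv_eq_ediv] <;> omega
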